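-- pv_equiv track=rewrite | github.com/daenu71/IWAS | src/core/irsdk/recorder_service.py | _find_available_names_for_aliases
-- ===== SOURCE A (Python) =====
-- from typing import Any
--
-- def _find_available_names_for_aliases(
--     available_channels: dict[str, dict[str, Any]],
--     aliases: tuple[str, ...] | list[str],
-- ) -> list[str]:
--     """Find available names for aliases."""
--     out: list[str] = []
--     seen: set[str] = set()
--     for alias in aliases:
--         target = "".join(ch.lower() for ch in str(alias or "") if ch.isalnum())
--         if not target:
--             continue
--         for candidate in available_channels.keys():
--             name = str(candidate)
--             key = "".join(ch.lower() for ch in name if ch.isalnum())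
--             if key != target:
--                 continue
--             if name in seen:
--                 continue
--             seen.add(name)
--             out.append(name)
--     out.sort(key=str.lower)
--     return out
-- ===== SOURCE B (Python) =====
-- def _find_available_names_for_aliases(available_channels, aliases):
--     def norm(s):
--         return "".join(ch.lower() for ch in s if ch.isalnum())
--     index = {}
--     for candidate in available_channels.keys():
--         name = str(candidate)
--         index.setdefault(norm(name), []).append(name)
--     matches = []
--     for target in dict.fromkeys(norm(str(a or "")) for a in aliases):
--         if target:
--             matches.extend(index.get(target, []))
--     return sorted(matches, key=str.lower)
-- ===== Notes on version B (the rewrite author's own statement) =====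
-- stated objective: faster
-- what changed: Replaces the nested alias-by-channel scan with a seen-set by one grouping pass that builds a normalized-key->names index over the channels, deduplicates the alias targets, and concatenates index lookups before the final case-insensitive sort.
import Mathlib
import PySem

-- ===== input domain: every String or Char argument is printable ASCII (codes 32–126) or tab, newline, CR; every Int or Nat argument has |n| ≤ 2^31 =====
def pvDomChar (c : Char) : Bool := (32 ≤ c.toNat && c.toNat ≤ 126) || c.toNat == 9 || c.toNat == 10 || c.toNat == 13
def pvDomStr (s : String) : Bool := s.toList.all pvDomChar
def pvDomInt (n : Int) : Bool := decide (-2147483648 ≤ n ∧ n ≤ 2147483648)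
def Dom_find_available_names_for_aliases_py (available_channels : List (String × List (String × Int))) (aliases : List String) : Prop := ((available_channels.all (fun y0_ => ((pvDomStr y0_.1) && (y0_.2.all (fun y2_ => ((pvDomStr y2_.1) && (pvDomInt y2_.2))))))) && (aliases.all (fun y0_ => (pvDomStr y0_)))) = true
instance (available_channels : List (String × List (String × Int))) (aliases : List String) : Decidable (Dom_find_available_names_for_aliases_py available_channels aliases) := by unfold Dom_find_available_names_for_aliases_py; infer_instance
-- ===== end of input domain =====

-- B removes the nested alias×channel scan: it groups channel names by normalized key once,
-- dedups the alias targets, and concatenates index lookups before the same case-insensitive sort.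

-- ===== PORT A =====
-- "".join(ch.lower() for ch in s if ch.isalnum())  (shared by both Pythons verbatim)
def pvNorm (s : String) : String :=
  String.ofList ((s.toList.filter PySem.Chars.isalnum).map PySem.Chars.lowerChar)

-- the inner 'for candidate in available_channels.keys(): …' body of A
def pvAInner (target : String) (st : List String × PySem.Set String) (name : String) :
    List String × PySem.Set String :=
  let key := pvNorm name
  if key ≠ target then st
  else if PySem.Set.contains st.2 name then st
  else (st.1 ++ [name], PySem.Set.add st.2 name)

def find_available_names_for_aliases_py (available_channels : List (String × List (String × Int))) (aliases : List String) : List String :=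
  -- dict keys: distinct, first-occurrence order
  let keys := PySem.List.dedup (available_channels.map Prod.fst)
  let st := aliases.foldl (fun st al =>
    let target := pvNorm (if al = "" then "" else al)   -- str(alias or "")
    if target = "" then st
    else keys.foldl (pvAInner target) st) ([], PySem.Set.empty)
  PySem.List.sorted st.1 PySem.Str.lower false

-- ===== PORT B =====
def find_available_names_for_aliases_py_alt (available_channels : List (String × List (String × Int))) (aliases : List String) : List String :=
  let keys := PySem.List.dedup (available_channels.map Prod.fst)
  -- index.setdefault(norm(name), []).append(name)
  let index := keys.foldl (fun d name => PySem.Dict.modify d (pvNorm name) [] (· ++ [name])) PySem.Dict.empty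
  let targets := PySem.List.dedup (aliases.map (fun a => pvNorm (if a = "" then "" else a)))
  let ms := targets.foldl (fun m t => if t = "" then m else m ++ PySem.Dict.getD index t []) []
  PySem.List.sorted ms PySem.Str.lower false

-- ===== PRECONDITION & SPEC =====
def Spec_find_available_names_for_aliases_py (available_channels : List (String × List (String × Int))) (aliases : List String) (out : List String) : Prop := out = find_available_names_for_aliases_py_alt available_channels aliases
instance (available_channels : List (String × List (String × Int))) (aliases : List String) (out : List String) : Decidable (Spec_find_available_names_for_aliases_py available_channels aliases out) := by unfold Spec_find_available_names_for_aliases_py; infer_instance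

-- ===== CLAIM (what is proved, stated in full; the proofs are below) =====
def Claim_equal_find_available_names_for_aliases_py : Prop := ∀ (available_channels : List (String × List (String × Int))) (aliases : List String), Dom_find_available_names_for_aliases_py available_channels aliases → Spec_find_available_names_for_aliases_py available_channels aliases (find_available_names_for_aliases_py available_channels aliases)

-- ===== LEMMAS AND PROOFS =====

-- the common pre-sort list: concatenation, over a target list, of the channel keys matching each nonempty target
def pvMid (keys : List String) (ts : List String) : List String :=
  ts.foldl (fun m t => if t = "" then m else m ++ keys.filter (fun n => pvNorm n == t)) []

theorem pvMid_snoc (keys ts : List String) (t : String) :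
    pvMid keys (ts ++ [t]) = if t = "" then pvMid keys ts
      else pvMid keys ts ++ keys.filter (fun n => pvNorm n == t) := by
  simp [pvMid, List.foldl_append]

theorem pvMem_mid (keys ts : List String) (n : String) :
    n ∈ pvMid keys ts ↔ n ∈ keys ∧ pvNorm n ∈ ts ∧ pvNorm n ≠ "" := by
  induction ts using List.reverseRecOn with
  | nil => simp [pvMid]
  | append_singleton ts t ih =>
      rw [pvMid_snoc]
      split_ifs with h
      · subst h
        rw [ih]
        constructor
        · rintro ⟨h1, h2, h3⟩; exact ⟨h1, by simp [h2], h3⟩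
        · rintro ⟨h1, h2, h3⟩
          simp at h2
          rcases h2 with h2 | h2
          · exact ⟨h1, h2, h3⟩
          · exact absurd h2 h3
      · simp only [List.mem_append, List.mem_filter, ih, beq_iff_eq]
        constructor
        · rintro (⟨h1, h2, h3⟩ | ⟨h1, h2⟩)
          · exact ⟨h1, by simp [h2], h3⟩
          · exact ⟨h1, by simp [h2], by rw [h2]; exact h⟩
        · rintro ⟨h1, h2, h3⟩
          simp at h2
          rcases h2 with h2 | h2
          · exact Or.inl ⟨h1, h2, h3⟩
          · exact Or.inr ⟨h1, h2⟩
  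
-- B's index lookup is exactly the per-target filter of the channel keys
theorem pvIndex_getD (keys : List String) (t : String) :
    PySem.Dict.getD (keys.foldl (fun d n => PySem.Dict.modify d (pvNorm n) [] (· ++ [n])) PySem.Dict.empty) t []
      = keys.filter (fun n => pvNorm n == t) := by
  have h := PySem.Dict.getD_foldl_modify_append (l := keys.map (fun n => (pvNorm n, n))) (d := PySem.Dict.empty) (c := t)
  rw [List.foldl_map] at h
  simpa [List.filter_map, Function.comp_def] using h

-- A's inner channel scan appends exactly the unseen keys matching the target
theorem pvInner_eq (t : String) :
    ∀ (ks : List String), ks.Nodup → ∀ out : List String,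
      ks.foldl (pvAInner t) (out, PySem.Set.ofList out)
      = (out ++ ks.filter (fun n => pvNorm n == t && !(out.contains n)),
         PySem.Set.ofList (out ++ ks.filter (fun n => pvNorm n == t && !(out.contains n)))) := by
  intro ks
  induction ks with
  | nil => intro _ out; simp
  | cons n ks ih =>
      intro hnd out
      have hn : n ∉ ks := (List.nodup_cons.1 hnd).1
      have hks : ks.Nodup := (List.nodup_cons.1 hnd).2
      by_cases hkey : pvNorm n = t
      · by_cases hout : n ∈ out
        · have hstep : pvAInner t (out, PySem.Set.ofList out) n = (out, PySem.Set.ofList out) := by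
            simp [pvAInner, hkey, PySem.Set.contains, hout]
          rw [List.foldl_cons, hstep, ih hks out]
          simp [hkey, hout]
        · have hmemo : n ∉ List.foldl PySem.Set.add [] out := by
            rw [← PySem.Set.ofList_eq_foldl]
            exact fun hx => hout ((PySem.Set.mem_ofList _ _).1 hx)
          have hstep : pvAInner t (out, PySem.Set.ofList out) n
              = (out ++ [n], PySem.Set.ofList (out ++ [n])) := by
            simp [pvAInner, hkey, PySem.Set.ofList_eq_foldl, List.foldl_append, hmemo]
          rw [List.foldl_cons, hstep, ih hks (out ++ [n])]
          have hfil : ks.filter (fun m => pvNorm m == t && !((out ++ [n]).contains m))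
              = ks.filter (fun m => pvNorm m == t && !(out.contains m)) := by
            apply List.filter_congr
            intro m hm
            have : m ≠ n := fun h => hn (h ▸ hm)
            simp [this]
          rw [hfil]
          simp [hkey, hout]
      · have hstep : pvAInner t (out, PySem.Set.ofList out) n = (out, PySem.Set.ofList out) := by
          simp [pvAInner, hkey]
        rw [List.foldl_cons, hstep, ih hks out]
        simp [hkey]

-- the accumulated distinct targets of the alias loop
def pvTargets (ts : List String) (as_ : List String) : List String :=
  as_.foldl (fun acc a => PySem.Set.add acc (pvNorm (if a = "" then "" else a))) ts

theorem pvTargets_nil (as_ : List String) :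
    pvTargets [] as_ = PySem.List.dedup (as_.map (fun a => pvNorm (if a = "" then "" else a))) := by
  rw [PySem.List.dedup_eq_ofList, PySem.Set.ofList_eq_foldl, List.foldl_map]
  rfl

-- A's outer alias loop, stated against the common pre-sort list pvMid
theorem pvOuter (keys : List String) (hk : keys.Nodup) (as_ : List String) :
    ∀ (ts : List String), ts.Nodup →
      as_.foldl (fun st al =>
          let target := pvNorm (if al = "" then "" else al)
          if target = "" then st
          else keys.foldl (pvAInner target) st)
        (pvMid keys ts, PySem.Set.ofList (pvMid keys ts))
      = (pvMid keys (pvTargets ts as_), PySem.Set.ofList (pvMid keys (pvTargets ts as_))) := by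
  induction as_ with
  | nil => intro ts _; rfl
  | cons a as_ ih =>
      intro ts hts
      set t := pvNorm (if a = "" then "" else a) with ht
      have hadd : pvTargets ts (a :: as_) = pvTargets (PySem.Set.add ts t) as_ := rfl
      have hmid_add : pvMid keys (PySem.Set.add ts t) = if t ∈ ts then pvMid keys ts
          else pvMid keys (ts ++ [t]) := by
        by_cases hmem : t ∈ ts
        · simp [PySem.Set.add, PySem.Set.contains, hmem]
        · simp [PySem.Set.add, PySem.Set.contains, hmem]
      have hnd_add : (PySem.Set.add ts t).Nodup := by
        by_cases hmem : t ∈ ts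
        · simpa [PySem.Set.add, PySem.Set.contains, hmem] using hts
        · simpa [PySem.Set.add, PySem.Set.contains, hmem, List.nodup_append] using
            ⟨hts, fun a ha h => hmem (h ▸ ha)⟩
      rw [List.foldl_cons]
      by_cases h0 : t = ""
      · have hmid : pvMid keys (PySem.Set.add ts t) = pvMid keys ts := by
          rw [hmid_add]
          split_ifs with hmem
          · rfl
          · rw [pvMid_snoc]; simp [h0]
        simp only [← ht, h0, if_pos]
        rw [hadd, ← hmid]
        exact ih _ hnd_add
      · simp only [← ht, if_neg h0]
        by_cases hmem : t ∈ ts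
        · have hfil : keys.filter (fun n => pvNorm n == t && !((pvMid keys ts).contains n)) = [] := by
            rw [List.filter_eq_nil_iff]
            intro n hnk
            by_cases hnt : pvNorm n = t
            · have : n ∈ pvMid keys ts := (pvMem_mid keys ts n).2 ⟨hnk, hnt ▸ hmem, hnt ▸ h0⟩
              simp [this]
            · simp [hnt]
          rw [pvInner_eq t keys hk (pvMid keys ts), hfil]
          simp only [List.append_nil]
          rw [hadd, ← hmid_add.trans (if_pos hmem) ]
          exact ih _ hnd_add
        · have hfil : keys.filter (fun n => pvNorm n == t && !((pvMid keys ts).contains n))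
              = keys.filter (fun n => pvNorm n == t) := by
            apply List.filter_congr
            intro n hnk
            by_cases hnt : pvNorm n = t
            · have : n ∉ pvMid keys ts := by
                intro hmm
                exact hmem (hnt ▸ ((pvMem_mid keys ts n).1 hmm).2.1)
              simp [hnt, this]
            · simp [hnt]
          rw [pvInner_eq t keys hk (pvMid keys ts), hfil]
          have : pvMid keys ts ++ keys.filter (fun n => pvNorm n == t) = pvMid keys (ts ++ [t]) := by
            rw [pvMid_snoc]; simp [h0]
          rw [this, hadd, ← hmid_add.trans (if_neg hmem)]
          exact ih _ hnd_add

theorem find_available_names_for_aliases_py_spec : Claim_equal_find_available_names_for_aliases_py := by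
  intro ac aliases _
  show _ = _
  unfold find_available_names_for_aliases_py find_available_names_for_aliases_py_alt
  simp only []
  set keys := PySem.List.dedup (ac.map Prod.fst) with hkeys
  have hk : keys.Nodup := PySem.List.nodup_dedup _
  have hinit : (([], PySem.Set.empty) : List String × PySem.Set String)
      = (pvMid keys [], PySem.Set.ofList (pvMid keys [])) := rfl
  rw [hinit, pvOuter keys hk aliases [] List.nodup_nil, pvTargets_nil]
  have hB : (PySem.List.dedup (aliases.map (fun a => pvNorm (if a = "" then "" else a)))).foldl
        (fun m t => if t = "" then m
          else m ++ PySem.Dict.getD (keys.foldl (fun d name => PySem.Dict.modify d (pvNorm name) [] (· ++ [name])) PySem.Dict.empty) t []) []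
      = pvMid keys (PySem.List.dedup (aliases.map (fun a => pvNorm (if a = "" then "" else a)))) := by
    unfold pvMid
    congr 1
    funext m t
    rw [pvIndex_getD]
  rw [hB]
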